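-- pv_equiv track=rewrite | github.com/BBarbazukLab/papers | Boatwright_et_al.,2018/Python_CORE_scripts/determine_COREs.py | get_start_index
-- ===== SOURCE A (Python) =====
-- def get_start_index(msa_seqs):
--     """Get start indices from MSA"""
--     start_indices = []
--     for sequence in msa_seqs:
--         for nucleotide in sequence:
--             if nucleotide != '-':
--                 start_indices.append(sequence.index(nucleotide))
--                 break
--     return start_indices
-- ===== SOURCE B (Python) =====
-- def get_start_index(msa_seqs):
--     """Get start indices from MSA"""
--     result = []
--     for sequence in msa_seqs:
--         stripped = sequence.lstrip('-')
--         if stripped: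
--             result.append(len(sequence) - len(stripped))
--     return result
-- ===== Notes on version B (the rewrite author's own statement) =====
-- stated objective: idiomatic
-- what changed: Replaces the character-by-character inner loop plus the redundant sequence.index rescan with a single lstrip('-') and a length difference per sequence.
import Mathlib
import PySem

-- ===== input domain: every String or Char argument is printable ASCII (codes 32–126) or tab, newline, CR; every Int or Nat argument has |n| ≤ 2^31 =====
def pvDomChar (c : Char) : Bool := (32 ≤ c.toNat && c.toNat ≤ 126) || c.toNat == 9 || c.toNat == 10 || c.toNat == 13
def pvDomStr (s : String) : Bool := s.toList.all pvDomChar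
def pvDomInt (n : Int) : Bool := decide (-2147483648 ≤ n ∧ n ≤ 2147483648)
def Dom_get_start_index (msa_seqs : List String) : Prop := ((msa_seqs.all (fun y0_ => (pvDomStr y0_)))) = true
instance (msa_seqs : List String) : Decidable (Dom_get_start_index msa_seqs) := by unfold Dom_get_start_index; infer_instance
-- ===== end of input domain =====

-- ===== PORT A =====
-- A: for each sequence, scan for the first non-gap character and append sequence.index(that char).
-- pvFirstNonGap transcribes A's inner `for … break` loop; sequence.index(c) is PySem.Str.find here
-- (exact, because the char was found in the sequence, so index never raises).
def pvFirstNonGap : List Char → Option Char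
  | [] => none
  | c :: cs => if c ≠ '-' then some c else pvFirstNonGap cs

def get_start_index (msa_seqs : List String) : List Int :=
  msa_seqs.foldl (fun start_indices sequence =>
    match pvFirstNonGap sequence.toList with
    | none => start_indices
    | some nucleotide => start_indices ++ [PySem.Str.find sequence (String.singleton nucleotide)]) []

-- ===== PORT B =====
-- B: lstrip the gaps and take the length difference; skip sequences that strip to empty.
def get_start_index_alt (msa_seqs : List String) : List Int :=
  msa_seqs.foldl (fun result sequence =>
    let stripped := sequence.toList.dropWhile (fun c => c == '-')
    if stripped ≠ [] then result ++ [PySem.Str.len sequence - (stripped.length : Int)] else result) []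

-- ===== PRECONDITION & SPEC =====
def Spec_get_start_index (msa_seqs : List String) (out : List Int) : Prop := out = get_start_index_alt msa_seqs
instance (msa_seqs : List String) (out : List Int) : Decidable (Spec_get_start_index msa_seqs out) := by unfold Spec_get_start_index; infer_instance

-- ===== CLAIM (what is proved, stated in full; the proofs are below) =====
def Claim_equal_get_start_index : Prop := ∀ (msa_seqs : List String), Dom_get_start_index msa_seqs → Spec_get_start_index msa_seqs (get_start_index msa_seqs)

-- ===== LEMMAS AND PROOFS =====

theorem pvFirstNonGap_ne (l : List Char) (c : Char) (h : pvFirstNonGap l = some c) : c ≠ '-' := by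
  induction l with
  | nil => simp [pvFirstNonGap] at h
  | cons a t ih =>
    by_cases ha : a ≠ '-'
    · simp [pvFirstNonGap, ha] at h; simpa [← h] using ha
    · simp [pvFirstNonGap, ha] at h; exact ih h

-- the per-sequence value: A's (first non-gap char, find it) equals B's (leading-gap count), with
-- find's running offset k generalized
theorem pvKey (l : List Char) (k : Nat) :
    (match pvFirstNonGap l with
     | none => (none : Option Int)
     | some c => some (PySem.Chars.find.go [c] l k)) =
    (if l.dropWhile (fun c => c == '-') = [] then none
     else some ((k : Int) + l.length - (l.dropWhile (fun c => c == '-')).length)) := by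
  induction l generalizing k with
  | nil => simp [pvFirstNonGap]
  | cons a t ih =>
    by_cases ha : a = '-'
    · subst ha
      have hdrop : (('-' :: t).dropWhile (fun c => c == '-')) = t.dropWhile (fun c => c == '-') := by
        simp [List.dropWhile]
      rw [hdrop]
      have hfg : pvFirstNonGap ('-' :: t) = pvFirstNonGap t := by simp [pvFirstNonGap]
      rw [hfg]
      cases hc : pvFirstNonGap t with
      | none =>
        have := ih (k + 1); rw [hc] at this; simpa using this
      | some c =>
        have hcne : c ≠ '-' := pvFirstNonGap_ne t c hc
        have hgo : PySem.Chars.find.go [c] ('-' :: t) k = PySem.Chars.find.go [c] t (k + 1) := by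
          simp [PySem.Chars.find.go, List.isPrefixOf, hcne]
        have := ih (k + 1); rw [hc] at this
        dsimp only at this ⊢
        rw [hgo, this]
        split_ifs with h
        · rfl
        · congr 1; push_cast; simp; ring
    · have hfg : pvFirstNonGap (a :: t) = some a := by simp [pvFirstNonGap, ha]
      have hdrop : ((a :: t).dropWhile (fun c => c == '-')) = a :: t := by
        rw [List.dropWhile_cons_of_neg]; simpa using ha
      have hgo : PySem.Chars.find.go [a] (a :: t) k = (k : Int) := by
        simp [PySem.Chars.find.go, List.isPrefixOf]
      rw [hfg, hdrop]
      dsimp only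
      rw [hgo]
      simp

theorem pvStep (acc : List Int) (s : String) :
    (match pvFirstNonGap s.toList with
     | none => acc
     | some nucleotide => acc ++ [PySem.Str.find s (String.singleton nucleotide)]) =
    (let stripped := s.toList.dropWhile (fun c => c == '-')
     if stripped ≠ [] then acc ++ [PySem.Str.len s - (stripped.length : Int)] else acc) := by
  have hfind : ∀ c, PySem.Str.find s (String.singleton c) = PySem.Chars.find.go [c] s.toList 0 := by
    intro c; simp [PySem.Str.find, PySem.Chars.find]
  have h := pvKey s.toList 0
  cases hc : pvFirstNonGap s.toList with
  | none =>
    rw [hc] at h; dsimp only at h ⊢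
    split_ifs at h with hd
    · simp [hd]
  | some c =>
    rw [hc] at h; dsimp only at h ⊢
    split_ifs at h with hd
    · simp only [Option.some.injEq, Nat.cast_zero, zero_add] at h
      rw [hfind, h, if_pos hd]
      simp [PySem.Str.len_eq]

theorem pvFold (seqs : List String) (acc : List Int) :
    seqs.foldl (fun start_indices sequence =>
      match pvFirstNonGap sequence.toList with
      | none => start_indices
      | some nucleotide => start_indices ++ [PySem.Str.find sequence (String.singleton nucleotide)]) acc =
    seqs.foldl (fun result sequence =>
      let stripped := sequence.toList.dropWhile (fun c => c == '-')
      if stripped ≠ [] then result ++ [PySem.Str.len sequence - (stripped.length : Int)] else result) acc := by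
  induction seqs generalizing acc with
  | nil => rfl
  | cons s t ih => rw [List.foldl_cons, List.foldl_cons, pvStep]; exact ih _

-- ===== VERDICT (by name: the statement is the Claim_ definition above) =====
theorem get_start_index_spec : Claim_equal_get_start_index := by
  intro msa_seqs _
  unfold Spec_get_start_index get_start_index get_start_index_alt
  exact pvFold msa_seqs []
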